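-- pv_equiv track=rewrite | github.com/cyberpath-HQ/sentinel | bindings/cxx/sync_api.py | _parse_doc_output
-- ===== SOURCE A (Python) =====
-- from typing import Dict, List, Set, Tuple
--
-- def _parse_doc_output(output: str) -> Dict:
--     """Parse cargo doc output to extract API information"""
--     api_info = {
--         'functions': [],
--         'structs': [],
--         'enums': [],
--         'traits': []
--     }
--
--     # Simple regex-based parsing (could be improved with proper AST parsing)
--     lines = output.split('\n')
--
--     current_section = None
--     for line in lines:
--         if '## Functions' in line:
--             current_section = 'functions'
--         elif '## Structs' in line:
--             current_section = 'structs'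
--         elif '## Enums' in line:
--             current_section = 'enums'
--         elif '## Traits' in line:
--             current_section = 'traits'
--         elif current_section and line.strip().startswith('pub '):
--             if current_section in api_info:
--                 api_info[current_section].append(line.strip())
--
--     return api_info
-- ===== SOURCE B (Python) =====
-- def _parse_doc_output(output: str):
--     """Parse cargo doc output to extract API information (segment-then-extract)."""
--     def _header_of(line):
--         for sub, name in (('## Functions', 'functions'), ('## Structs', 'structs'),
--                           ('## Enums', 'enums'), ('## Traits', 'traits')):
--             if sub in line:
--                 return name
--         return None
--
--     # Phase 1: cut the line list into header-labelled blocks; lines before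
--     # the first recognized header belong to no block and are dropped.
--     blocks = []
--     rest = output.split('\n')
--     while rest:
--         head, rest = rest[0], rest[1:]
--         name = _header_of(head)
--         if name is None:
--             continue
--         body = []
--         while rest and _header_of(rest[0]) is None:
--             body.append(rest[0])
--             rest = rest[1:]
--         blocks.append((name, body))
--
--     # Phase 2: per block, keep the stripped lines that declare a pub item.
--     api_info = {'functions': [], 'structs': [], 'enums': [], 'traits': []}
--     for name, body in blocks:
--         api_info[name].extend(s for s in (l.strip() for l in body) if s.startswith('pub '))
--     return api_info
-- ===== Notes on version B (the rewrite author's own statement) =====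
-- stated objective: alternative
-- what changed: Replaced the single stateful scan that threads a current-section variable through every line with a two-phase segment-then-extract pipeline: first cut the line list into header-labelled blocks (dropping pre-header lines), then per block filter the stripped 'pub ' lines into the fixed-key dict.
import Mathlib
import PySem

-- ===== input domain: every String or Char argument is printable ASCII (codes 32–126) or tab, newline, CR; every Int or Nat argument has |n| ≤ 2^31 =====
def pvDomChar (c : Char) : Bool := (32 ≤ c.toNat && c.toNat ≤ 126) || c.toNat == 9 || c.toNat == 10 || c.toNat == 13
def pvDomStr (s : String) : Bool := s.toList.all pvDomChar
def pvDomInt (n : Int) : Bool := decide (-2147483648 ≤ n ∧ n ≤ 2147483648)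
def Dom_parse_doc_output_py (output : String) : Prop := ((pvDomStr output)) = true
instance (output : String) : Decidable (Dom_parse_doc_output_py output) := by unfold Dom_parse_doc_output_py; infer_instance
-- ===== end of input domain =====

-- B replaces A's single stateful current-section scan by a two-phase segment-then-extract
-- pipeline (header-labelled blocks first, then per-block 'pub ' filtering); alternative
-- decomposition of the same cost, proved to return the same association list.


-- ===== PORT A =====
-- one loop step of A: the elif chain over header substrings, else the current-section append
def pvStepA (st : PySem.Dict String (List String) × Option String) (line : String) :
    PySem.Dict String (List String) × Option String :=
  if PySem.Str.isIn "## Functions" line then (st.1, some "functions")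
  else if PySem.Str.isIn "## Structs" line then (st.1, some "structs")
  else if PySem.Str.isIn "## Enums" line then (st.1, some "enums")
  else if PySem.Str.isIn "## Traits" line then (st.1, some "traits")
  else
    match st.2 with
    | some sec =>
        if PySem.Str.startswith (PySem.Str.strip line) "pub " then
          if st.1.contains sec then
            (st.1.modify sec [] (fun xs => xs ++ [PySem.Str.strip line]), st.2)
          else st
        else st
    | none => st

def parse_doc_output_py (output : String) : List (String × List String) :=
  let api_info : PySem.Dict String (List String) :=
    PySem.Dict.ofList [("functions", []), ("structs", []), ("enums", []), ("traits", [])]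
  let lines := (PySem.Str.split? output "\n").getD []
  (lines.foldl pvStepA (api_info, none)).1.items

-- ===== PORT B =====
-- B's _header_of: first header substring found, in the same priority order
def pvHeaderOf (line : String) : Option String :=
  if PySem.Str.isIn "## Functions" line then some "functions"
  else if PySem.Str.isIn "## Structs" line then some "structs"
  else if PySem.Str.isIn "## Enums" line then some "enums"
  else if PySem.Str.isIn "## Traits" line then some "traits"
  else none

-- B's inner while loop: body lines up to the next header, and the remaining lines
def pvSpan : List String → List String × List String
  | [] => ([], [])
  | l :: ls =>
    match pvHeaderOf l with
    | some _ => ([], l :: ls)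
    | none => (l :: (pvSpan ls).1, (pvSpan ls).2)

-- used by pvBlocks' decreasing_by
theorem pvSpan_rest_le (ls : List String) : (pvSpan ls).2.length ≤ ls.length := by
  induction ls with
  | nil => simp [pvSpan]
  | cons l ls ih =>
    simp only [pvSpan]
    cases pvHeaderOf l
    · simp; omega
    · simp

-- B's outer while loop: the list of (section name, body lines) blocks
def pvBlocks : List String → List (String × List String)
  | [] => []
  | l :: ls =>
    match pvHeaderOf l with
    | none => pvBlocks ls
    | some name => (name, (pvSpan ls).1) :: pvBlocks (pvSpan ls).2
  termination_by ls => ls.length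
  decreasing_by
    · simp
    · have := pvSpan_rest_le ls; simp; omega

-- B's phase-2 generator: stripped lines of a body that start with 'pub '
def pvExtract (body : List String) : List String :=
  (body.map PySem.Str.strip).filter (fun s => PySem.Str.startswith s "pub ")

def parse_doc_output_py_alt (output : String) : List (String × List String) :=
  let blocks := pvBlocks ((PySem.Str.split? output "\n").getD [])
  let api_info : PySem.Dict String (List String) :=
    PySem.Dict.ofList [("functions", []), ("structs", []), ("enums", []), ("traits", [])]
  (blocks.foldl (fun api nb => api.modify nb.1 [] (fun xs => xs ++ pvExtract nb.2)) api_info).items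

-- ===== PRECONDITION & SPEC =====
def Spec_parse_doc_output_py (output : String) (out : List (String × List String)) : Prop := out = parse_doc_output_py_alt output
instance (output : String) (out : List (String × List String)) : Decidable (Spec_parse_doc_output_py output out) := by unfold Spec_parse_doc_output_py; infer_instance

-- ===== CLAIM (what is proved, stated in full; the proofs are below) =====
def Claim_equal_parse_doc_output_py : Prop := ∀ (output : String), Dom_parse_doc_output_py output → Spec_parse_doc_output_py output (parse_doc_output_py output)

-- ===== LEMMAS AND PROOFS =====
theorem pvModifyModify (d : PySem.Dict String (List String)) (k : String) (dflt : List String)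
    (f g : List String → List String) :
    (d.modify k dflt f).modify k dflt g = d.modify k dflt (fun v => g (f v)) := by
  simp [PySem.Dict.modify, PySem.Dict.getD_insert_self, PySem.Dict.insert_insert_self]

theorem pvInsertGetDSelf (l : List (String × List String)) (k : String) (dflt : List String)
    (hnd : (l.map Prod.fst).Nodup) (hc : (PySem.Dict.mk l).contains k = true) :
    (PySem.Dict.mk l).insert k ((PySem.Dict.mk l).getD k dflt) = PySem.Dict.mk l := by
  induction l with
  | nil => simp [PySem.Dict.contains] at hc
  | cons p t ih =>
    obtain ⟨a, b⟩ := p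
    rw [List.map_cons, List.nodup_cons] at hnd
    by_cases hk : a = k
    · subst hk
      simp only [PySem.Dict.insert, PySem.Dict.contains, PySem.Dict.getD, PySem.Dict.get?]
      simp only [List.any_cons, beq_self_eq_true, Bool.true_or, if_pos, List.find?_cons,
        Option.map_some, Option.getD_some, List.map_cons]
      simp only [PySem.Dict.mk.injEq, List.cons.injEq, true_and]
      have hmap : ∀ x ∈ t, (fun p : String × List String => if (p.1 == a) = true then (a, b) else p) x = x := by
        intro x hx
        have hx1 : x.1 ∈ List.map Prod.fst t := List.mem_map_of_mem hx
        have : x.1 ≠ a := by intro h; rw [h] at hx1; exact hnd.1 hx1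
        simp [this]
      rw [List.map_congr_left hmap]; simp
    · have hka : (a == k) = false := by simp [hk]
      have hc' : (PySem.Dict.mk t).contains k = true := by
        simpa [PySem.Dict.contains, hka] using hc
      have H := ih hnd.2 hc'
      simp only [PySem.Dict.contains] at hc'
      simp [PySem.Dict.insert, PySem.Dict.contains, PySem.Dict.getD, PySem.Dict.get?, hka, hc'] at H ⊢
      exact ⟨fun h => absurd h hk, H⟩

-- the invariant A's dict state keeps: the four fixed keys are present and unique
def pvInv (d : PySem.Dict String (List String)) : Prop :=
  d.keys.Nodup ∧ d.contains "functions" = true ∧ d.contains "structs" = true ∧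
    d.contains "enums" = true ∧ d.contains "traits" = true

theorem pvModifyIdOfContains (d : PySem.Dict String (List String)) (k : String) (dflt : List String)
    (hnd : d.keys.Nodup) (hc : d.contains k = true) : d.modify k dflt (fun v => v) = d := by
  obtain ⟨l⟩ := d
  exact pvInsertGetDSelf l k dflt hnd hc

theorem pvInvModify (d : PySem.Dict String (List String)) (k : String) (dflt : List String)
    (f : List String → List String) (h : pvInv d) : pvInv (d.modify k dflt f) := by
  obtain ⟨hnd, h1, h2, h3, h4⟩ := h
  refine ⟨?_, ?_, ?_, ?_, ?_⟩ <;>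
    simp [PySem.Dict.modify, PySem.Dict.nodup_keys_insert, PySem.Dict.contains_insert, hnd, h1, h2, h3, h4]

theorem pvContainsModify (d : PySem.Dict String (List String)) (k k' : String) (dflt : List String)
    (f : List String → List String) (h : d.contains k' = true) : (d.modify k dflt f).contains k' = true := by
  simp [PySem.Dict.modify, PySem.Dict.contains_insert, h]

theorem pvInvContains (d : PySem.Dict String (List String)) (line name : String)
    (hh : pvHeaderOf line = some name) (h : pvInv d) : d.contains name = true := by
  unfold pvHeaderOf at hh
  obtain ⟨-, h1, h2, h3, h4⟩ := h
  split_ifs at hh <;> simp_all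

theorem pvStepA_header (d : PySem.Dict String (List String)) (cur : Option String)
    (line name : String) (hh : pvHeaderOf line = some name) :
    pvStepA (d, cur) line = (d, some name) := by
  unfold pvHeaderOf at hh
  unfold pvStepA
  split_ifs at hh ⊢ <;> simp_all

theorem pvStepA_none (d : PySem.Dict String (List String)) (line : String)
    (hh : pvHeaderOf line = none) : pvStepA (d, none) line = (d, none) := by
  unfold pvHeaderOf at hh
  unfold pvStepA
  split_ifs at hh ⊢ <;> simp_all

theorem pvStepA_some (d : PySem.Dict String (List String)) (sec line : String)
    (hh : pvHeaderOf line = none) (hc : d.contains sec = true) :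
    pvStepA (d, some sec) line =
      (if PySem.Str.startswith (PySem.Str.strip line) "pub " then
         d.modify sec [] (fun xs => xs ++ [PySem.Str.strip line]) else d, some sec) := by
  unfold pvHeaderOf at hh
  unfold pvStepA
  split_ifs at hh ⊢ <;> simp_all

-- B's phase-2 loop as a function of the starting dict
def pvApplyB (d : PySem.Dict String (List String)) (bs : List (String × List String)) :
    PySem.Dict String (List String) :=
  bs.foldl (fun api nb => api.modify nb.1 [] (fun xs => xs ++ pvExtract nb.2)) d

theorem pvFoldSome (ls : List String) : ∀ (d : PySem.Dict String (List String)) (sec : String),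
    pvInv d → d.contains sec = true →
    (ls.foldl pvStepA (d, some sec)).1 =
      pvApplyB (d.modify sec [] (fun xs => xs ++ pvExtract (pvSpan ls).1)) (pvBlocks (pvSpan ls).2) := by
  induction ls with
  | nil =>
    intro d sec hinv hc
    simp only [List.foldl_nil, pvSpan, pvBlocks, pvApplyB, pvExtract, List.map_nil,
      List.filter_nil, List.append_nil, List.foldl_nil]
    exact (pvModifyIdOfContains d sec [] hinv.1 hc).symm
  | cons l ls ih =>
    intro d sec hinv hc
    rw [List.foldl_cons]
    cases hh : pvHeaderOf l with
    | some name =>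
      rw [pvStepA_header d (some sec) l name hh]
      have h1 : pvSpan (l :: ls) = ([], l :: ls) := by simp [pvSpan, hh]
      rw [h1]
      simp only [pvExtract, List.map_nil, List.filter_nil, List.append_nil]
      rw [pvModifyIdOfContains d sec [] hinv.1 hc]
      have h2 : pvBlocks (l :: ls) = (name, (pvSpan ls).1) :: pvBlocks (pvSpan ls).2 := by
        rw [pvBlocks]; simp [hh]
      rw [h2]
      simp only [pvApplyB, List.foldl_cons]
      exact ih d name hinv (pvInvContains d l name hh hinv)
    | none =>
      rw [pvStepA_some d sec l hh hc]
      have h1 : pvSpan (l :: ls) = (l :: (pvSpan ls).1, (pvSpan ls).2) := by simp [pvSpan, hh]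
      rw [h1]
      by_cases hp : PySem.Str.startswith (PySem.Str.strip l) "pub " = true
      · rw [if_pos hp]
        have he : pvExtract (l :: (pvSpan ls).1) = PySem.Str.strip l :: pvExtract (pvSpan ls).1 := by
          simp only [pvExtract, List.map_cons, List.filter_cons, hp, if_true]
        rw [he]
        have ih' := ih (d.modify sec [] (fun xs => xs ++ [PySem.Str.strip l])) sec
          (pvInvModify d sec [] _ hinv) (pvContainsModify d sec sec [] _ hc)
        rw [ih']
        congr 1
        rw [pvModifyModify]
        congr 1
        funext v
        simp
      · rw [if_neg hp]
        have hp' : PySem.Str.startswith (PySem.Str.strip l) "pub " = false := by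
          simpa using hp
        have he : pvExtract (l :: (pvSpan ls).1) = pvExtract (pvSpan ls).1 := by
          simp only [pvExtract, List.map_cons, List.filter_cons, hp', Bool.false_eq_true, if_false]
        rw [he]
        exact ih d sec hinv hc

theorem pvFoldNone (ls : List String) : ∀ (d : PySem.Dict String (List String)),
    pvInv d → (ls.foldl pvStepA (d, none)).1 = pvApplyB d (pvBlocks ls) := by
  induction ls with
  | nil => intro d _; simp [pvBlocks, pvApplyB]
  | cons l ls ih =>
    intro d hinv
    rw [List.foldl_cons]
    cases hh : pvHeaderOf l with
    | some name =>
      rw [pvStepA_header d none l name hh]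
      have h2 : pvBlocks (l :: ls) = (name, (pvSpan ls).1) :: pvBlocks (pvSpan ls).2 := by
        rw [pvBlocks]; simp [hh]
      rw [h2]
      simp only [pvApplyB, List.foldl_cons]
      exact pvFoldSome ls d name hinv (pvInvContains d l name hh hinv)
    | none =>
      rw [pvStepA_none d l hh]
      have h2 : pvBlocks (l :: ls) = pvBlocks ls := by rw [pvBlocks]; simp [hh]
      rw [h2]
      exact ih d hinv

-- ===== VERDICT (by name: the statement is the Claim_ definition above) =====
theorem parse_doc_output_py_spec : Claim_equal_parse_doc_output_py := by
  unfold Claim_equal_parse_doc_output_py Spec_parse_doc_output_py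
  intro output _
  unfold parse_doc_output_py parse_doc_output_py_alt
  have hinv : pvInv (PySem.Dict.ofList
      [("functions", []), ("structs", []), ("enums", []), ("traits", [])]) := by
    refine ⟨?_, ?_, ?_, ?_, ?_⟩ <;> decide
  show (List.foldl pvStepA (_, none) _).1.items = _
  rw [pvFoldNone _ _ hinv]
  rfl
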